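-- pv_equiv track=rewrite | github.com/c0re-i5/sort-explorer | 09_bitwise_and_novel_sorts.py | wavelet_tree_sort_traced
-- ===== SOURCE A (Python) =====
-- def wavelet_tree_sort_traced(arr):
--     """Traced version showing the decomposition tree."""
--     if len(arr) <= 1:
--         return arr[:], []
--     trace = []
--
--     def _build(elements, lo_val, hi_val, depth=0):
--         if not elements:
--             return []
--         if lo_val >= hi_val:
--             return list(elements)
--
--         mid_val = (lo_val + hi_val) // 2
--         left = []
--         right = []
--         bitvec = []
--         for val in elements:
--             if val <= mid_val:
--                 left.append(val)
--                 bitvec.append(0)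
--             else:
--                 right.append(val)
--                 bitvec.append(1)
--
--         indent = "    " + "  " * depth
--         trace.append(
--             f"{indent}Split [{lo_val}..{hi_val}] at {mid_val}: "
--             f"{''.join(map(str, bitvec))} → L:{left} R:{right}"
--         )
--
--         return _build(left, lo_val, mid_val, depth + 1) + \
--                _build(right, mid_val + 1, hi_val, depth + 1)
--
--     result = _build(arr, min(arr), max(arr))
--     return result, trace
-- ===== SOURCE B (Python) =====
-- def wavelet_tree_sort_traced(arr):
--     """Iterative wavelet-tree sort: explicit stack of frames instead of recursion."""
--     if len(arr) <= 1:
--         return arr[:], []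
--     result = []
--     trace = []
--     stack = [(arr, min(arr), max(arr), 0)]
--     while stack:
--         elements, lo_val, hi_val, depth = stack.pop()
--         if not elements:
--             continue
--         if lo_val >= hi_val:
--             result.extend(elements)
--             continue
--         mid_val = (lo_val + hi_val) // 2
--         left = [v for v in elements if v <= mid_val]
--         right = [v for v in elements if v > mid_val]
--         bits = ''.join('0' if v <= mid_val else '1' for v in elements)
--         indent = "    " + "  " * depth
--         trace.append(
--             f"{indent}Split [{lo_val}..{hi_val}] at {mid_val}: "
--             f"{bits} → L:{left} R:{right}"
--         )
--         stack.append((right, mid_val + 1, hi_val, depth + 1))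
--         stack.append((left, lo_val, mid_val, depth + 1))
--     return result, trace
-- ===== Notes on version B (the rewrite author's own statement) =====
-- stated objective: alternative
-- what changed: Replaced the nested recursive _build (mutable trace closure, one three-way partition loop) by an iterative explicit-stack traversal (push right then left) with result/trace accumulators and comprehension-style filters for the partition.
import Mathlib
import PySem

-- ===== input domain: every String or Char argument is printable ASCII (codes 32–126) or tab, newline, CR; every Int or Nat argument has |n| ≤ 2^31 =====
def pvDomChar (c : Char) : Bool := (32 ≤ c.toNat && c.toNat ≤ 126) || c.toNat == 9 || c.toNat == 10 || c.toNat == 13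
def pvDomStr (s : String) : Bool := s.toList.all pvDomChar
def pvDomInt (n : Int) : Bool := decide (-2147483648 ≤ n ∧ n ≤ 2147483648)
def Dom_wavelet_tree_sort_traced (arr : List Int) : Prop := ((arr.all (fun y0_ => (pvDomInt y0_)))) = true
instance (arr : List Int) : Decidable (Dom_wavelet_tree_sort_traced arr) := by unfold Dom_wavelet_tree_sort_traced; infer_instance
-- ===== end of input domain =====

-- B replaces the nested recursive `_build` (with a mutable trace closure) by an iterative
-- explicit-stack traversal with result/trace accumulators; objective: alternative decomposition.

-- Shared formatting helpers (the f-string is byte-identical in A and B)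

-- Python repr of a list of ints: "[a, b, c]"
def pyListRepr (xs : List Int) : String :=
  "[" ++ PySem.Str.join ", " (xs.map PySem.Int.toStr) ++ "]"

-- "  " * depth  (string repetition by a nonnegative count; exact for Nat counts)
def strMul (s : String) : Nat → String
  | 0 => ""
  | n + 1 => s ++ strMul s n

-- the f-string of the trace line, shared verbatim by both Pythons
def lineStr (lo hi mid : Int) (depth : Nat) (bits : String) (left right : List Int) : String :=
  "    " ++ strMul "  " depth ++ "Split [" ++ PySem.Int.toStr lo ++ ".." ++ PySem.Int.toStr hi
    ++ "] at " ++ PySem.Int.toStr mid ++ ": " ++ bits ++ " → L:" ++ pyListRepr left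
    ++ " R:" ++ pyListRepr right

-- midpoint bounds used for termination of both ports
theorem pvMid_bounds {lo hi : Int} (h : lo < hi) :
    lo ≤ PySem.Int.floordiv (lo + hi) 2 ∧ PySem.Int.floordiv (lo + hi) 2 < hi := by
  rw [PySem.Int.floordiv_eq_ediv_of_pos (by omega : (0:Int) < 2)]
  omega

-- termination lemmas, cited by name in decreasing_by (keeps the proof terms out of the bodies)
theorem pvDecL {lo hi : Int} (h : ¬ lo ≥ hi) :
    (PySem.Int.floordiv (lo + hi) 2 - lo).toNat < (hi - lo).toNat := by
  have := pvMid_bounds (by omega : lo < hi); omega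

theorem pvDecR {lo hi : Int} (h : ¬ lo ≥ hi) :
    (hi - (PySem.Int.floordiv (lo + hi) 2 + 1)).toNat < (hi - lo).toNat := by
  have := pvMid_bounds (by omega : lo < hi); omega

-- ===== PORT A =====

-- A's partition loop: one pass appending to left / right / bitvec
def partA (elements : List Int) (mid : Int) : List Int × List Int × List Int :=
  elements.foldl
    (fun s val =>
      if val ≤ mid then (s.1 ++ [val], s.2.1, s.2.2 ++ [(0 : Int)])
      else (s.1, s.2.1 ++ [val], s.2.2 ++ [(1 : Int)]))
    ([], [], [])

-- A's recursive _build; the mutable `trace` closure is modeled as the second component,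
-- emitted in A's append order (node line, then left subtree's lines, then right's).
def buildA (elements : List Int) (lo hi : Int) (depth : Nat) : List Int × List String :=
  if elements = [] then ([], [])
  else if lo ≥ hi then (elements, [])
  else
    let mid := PySem.Int.floordiv (lo + hi) 2
    let p := partA elements mid
    let line := lineStr lo hi mid depth (PySem.Str.join "" (p.2.2.map PySem.Int.toStr)) p.1 p.2.1
    let L := buildA p.1 lo mid (depth + 1)
    let R := buildA p.2.1 (mid + 1) hi (depth + 1)
    (L.1 ++ R.1, line :: (L.2 ++ R.2))
  termination_by (hi - lo).toNat
  decreasing_by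
    · exact pvDecL ‹¬ lo ≥ hi›
    · exact pvDecR ‹¬ lo ≥ hi›

def wavelet_tree_sort_traced (arr : List Int) : List Int × List String :=
  if arr.length ≤ 1 then (arr, [])
  else
    -- min(arr)/max(arr): arr is nonempty here, so min?/max? are `some`
    let lo := (PySem.List.min? arr (fun x => x)).getD 0
    let hi := (PySem.List.max? arr (fun x => x)).getD 0
    buildA arr lo hi 0

-- ===== PORT B =====

-- B's list comprehensions and bit string, as named helpers
def compLe (es : List Int) (mid : Int) : List Int := es.filter (fun v => decide (v ≤ mid))
def compGt (es : List Int) (mid : Int) : List Int := es.filter (fun v => decide (mid < v))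
def compBits (es : List Int) (mid : Int) : String :=
  PySem.Str.join "" (es.map (fun v => if v ≤ mid then "0" else "1"))

-- frame = (elements, lo_val, hi_val, depth); stack head = Python's stack top
def frameW (f : List Int × Int × Int × Nat) : Nat := 2 * (f.2.2.1 - f.2.1).toNat + 1

-- termination lemmas for the stack loop, cited by name in decreasing_by
theorem pvDecPop (f : List Int × Int × Int × Nat) (rest : List (List Int × Int × Int × Nat)) :
    (rest.map frameW).sum < ((f :: rest).map frameW).sum := by
  simp [frameW]

theorem pvDecSplit (es left right : List Int) (lo hi : Int) (d : Nat)
    (rest : List (List Int × Int × Int × Nat)) (h : ¬ lo ≥ hi) :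
    (((left, lo, PySem.Int.floordiv (lo + hi) 2, d + 1) ::
       (right, PySem.Int.floordiv (lo + hi) 2 + 1, hi, d + 1) :: rest).map frameW).sum <
      (((es, lo, hi, d) :: rest).map frameW).sum := by
  have := pvMid_bounds (by omega : lo < hi); simp [frameW]; omega

-- B's while-loop over the explicit stack, with result/trace accumulators
def runB (stack : List (List Int × Int × Int × Nat)) (result : List Int) (trace : List String) :
    List Int × List String :=
  match stack with
  | [] => (result, trace)
  | (elements, lo, hi, depth) :: rest =>
    if elements = [] then runB rest result trace
    else if lo ≥ hi then runB rest (result ++ elements) trace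
    else
      let mid := PySem.Int.floordiv (lo + hi) 2
      let left := compLe elements mid
      let right := compGt elements mid
      let bits := compBits elements mid
      runB ((left, lo, mid, depth + 1) :: (right, mid + 1, hi, depth + 1) :: rest)
        result (trace ++ [lineStr lo hi mid depth bits left right])
  termination_by (stack.map frameW).sum
  decreasing_by
    · exact pvDecPop _ _
    · exact pvDecPop _ _
    · exact pvDecSplit elements _ _ lo hi depth rest ‹¬ lo ≥ hi›

def wavelet_tree_sort_traced_alt (arr : List Int) : List Int × List String :=
  if arr.length ≤ 1 then (arr, [])
  else
    let lo := (PySem.List.min? arr (fun x => x)).getD 0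
    let hi := (PySem.List.max? arr (fun x => x)).getD 0
    runB [(arr, lo, hi, 0)] [] []

-- ===== PRECONDITION & SPEC =====
def Spec_wavelet_tree_sort_traced (arr : List Int) (out : List Int × List String) : Prop := out = wavelet_tree_sort_traced_alt arr
instance (arr : List Int) (out : List Int × List String) : Decidable (Spec_wavelet_tree_sort_traced arr out) := by unfold Spec_wavelet_tree_sort_traced; infer_instance

-- ===== CLAIM (what is proved, stated in full; the proofs are below) =====
def Claim_equal_wavelet_tree_sort_traced : Prop := ∀ (arr : List Int), Dom_wavelet_tree_sort_traced arr → Spec_wavelet_tree_sort_traced arr (wavelet_tree_sort_traced arr)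

-- ===== LEMMAS AND PROOFS =====

-- A's one-pass partition equals B's two filters plus the bit map
theorem partA_aux (mid : Int) (es : List Int) : ∀ (l r b : List Int),
    es.foldl
      (fun s val =>
        if val ≤ mid then (s.1 ++ [val], s.2.1, s.2.2 ++ [(0 : Int)])
        else (s.1, s.2.1 ++ [val], s.2.2 ++ [(1 : Int)])) (l, r, b)
    = (l ++ es.filter (fun v => decide (v ≤ mid)),
       r ++ es.filter (fun v => decide (mid < v)),
       b ++ es.map (fun v => if v ≤ mid then (0 : Int) else 1)) := by
  induction es with
  | nil => intro l r b; simp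
  | cons v t ih =>
    intro l r b
    simp only [List.foldl_cons]
    by_cases h : v ≤ mid
    · have h2 : ¬ mid < v := by omega
      simp [h, h2, ih, List.append_assoc]
    · have h2 : mid < v := by omega
      simp [h, h2, ih, List.append_assoc]

theorem partA_eq (elements : List Int) (mid : Int) :
    partA elements mid =
      (compLe elements mid, compGt elements mid,
       elements.map (fun v => if v ≤ mid then (0 : Int) else 1)) := by
  unfold partA compLe compGt
  simpa using partA_aux mid elements [] [] []

-- the bit strings coincide: str(0)/str(1) joined = '0'/'1' joined
theorem bits_eq (elements : List Int) (mid : Int) :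
    PySem.Str.join "" ((elements.map (fun v => if v ≤ mid then (0 : Int) else 1)).map PySem.Int.toStr)
      = compBits elements mid := by
  unfold compBits
  rw [List.map_map]
  congr 1
  refine List.map_congr_left ?_
  intro v _
  by_cases h : v ≤ mid <;> simp [Function.comp, h] <;> rfl

-- buildA, one unfolding per shape
theorem buildA_nil (lo hi : Int) (d : Nat) : buildA [] lo hi d = ([], []) := by
  rw [buildA]; simp

theorem buildA_leaf (es : List Int) (lo hi : Int) (d : Nat) (h1 : es ≠ []) (h2 : lo ≥ hi) :
    buildA es lo hi d = (es, []) := by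
  rw [buildA]; simp [h1, h2]

theorem buildA_node (es : List Int) (lo hi : Int) (d : Nat) (h1 : es ≠ []) (h2 : ¬ lo ≥ hi) :
    buildA es lo hi d =
      ((buildA (compLe es (PySem.Int.floordiv (lo + hi) 2)) lo (PySem.Int.floordiv (lo + hi) 2) (d + 1)).1 ++
        (buildA (compGt es (PySem.Int.floordiv (lo + hi) 2)) (PySem.Int.floordiv (lo + hi) 2 + 1) hi (d + 1)).1,
       lineStr lo hi (PySem.Int.floordiv (lo + hi) 2) d
          (compBits es (PySem.Int.floordiv (lo + hi) 2))
          (compLe es (PySem.Int.floordiv (lo + hi) 2))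
          (compGt es (PySem.Int.floordiv (lo + hi) 2))
        :: ((buildA (compLe es (PySem.Int.floordiv (lo + hi) 2)) lo (PySem.Int.floordiv (lo + hi) 2) (d + 1)).2 ++
            (buildA (compGt es (PySem.Int.floordiv (lo + hi) 2)) (PySem.Int.floordiv (lo + hi) 2 + 1) hi (d + 1)).2)) := by
  rw [buildA]
  simp only [if_neg h1, if_neg h2, partA_eq, bits_eq]

-- loop invariant: the stack run produces the concatenation of the recursive builds
theorem runB_eq (stack : List (List Int × Int × Int × Nat)) (result : List Int) (trace : List String) :
    runB stack result trace =
      (result ++ (stack.map (fun f => (buildA f.1 f.2.1 f.2.2.1 f.2.2.2).1)).flatten,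
       trace ++ (stack.map (fun f => (buildA f.1 f.2.1 f.2.2.1 f.2.2.2).2)).flatten) := by
  fun_induction runB with
  | case1 => simp
  | case2 res tr lo hi depth rest ih =>
    simp [ih, buildA_nil]
  | case3 res tr elements lo hi depth rest h1 h2 ih =>
    rw [ih]
    simp [buildA_leaf elements lo hi depth h1 h2, List.append_assoc]
  | case4 res tr elements lo hi depth rest h1 h2 mid left right bits ih =>
    rw [ih]
    simp [buildA_node elements lo hi depth h1 h2, mid, left, right, bits, List.append_assoc]

-- ===== VERDICT (by name: the statement is the Claim_ definition above) =====
theorem wavelet_tree_sort_traced_spec : Claim_equal_wavelet_tree_sort_traced := by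
  intro arr _
  unfold Spec_wavelet_tree_sort_traced wavelet_tree_sort_traced wavelet_tree_sort_traced_alt
  split
  · rfl
  · rw [runB_eq]; simp
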